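-- pv_equiv track=rewrite | github.com/harishvc/challenges | find-three-numbers-when-multipled-provide-max-value.py | MaxPair
-- ===== SOURCE A (Python) =====
-- def MaxPair(input):
--     size = len(input) -1
--     max = None
--     for i in range(0,len(input)-2):
--         a = i
--         b = i+1
--         c = size
--         while (b < c):
--             new = input[a] * input[b] * input[c]
--             if (max is None or max < new):
--                 max = new
--             c -= 1
--     return max
-- ===== SOURCE B (Python) =====
-- def MaxPair(input):
--     n = len(input)
--     if n < 3:
--         return None
--     hi = lo = input[n - 1]
--     best = None
--     for i in range(n - 3, -1, -1):
--         z = input[i + 2]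
--         if z > hi:
--             hi = z
--         if z < lo:
--             lo = z
--         p = input[i] * input[i + 1]
--         cand = p * hi if p >= 0 else p * lo
--         if best is None or best < cand:
--             best = cand
--     return best
-- ===== Notes on version B (the rewrite author's own statement) =====
-- stated objective: faster
-- what changed: Replaces the quadratic double loop (for each adjacent pair, scan all later elements) by a single backward pass that maintains running suffix max/min and picks max or min by the sign of the adjacent-pair product.
import Mathlib
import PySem

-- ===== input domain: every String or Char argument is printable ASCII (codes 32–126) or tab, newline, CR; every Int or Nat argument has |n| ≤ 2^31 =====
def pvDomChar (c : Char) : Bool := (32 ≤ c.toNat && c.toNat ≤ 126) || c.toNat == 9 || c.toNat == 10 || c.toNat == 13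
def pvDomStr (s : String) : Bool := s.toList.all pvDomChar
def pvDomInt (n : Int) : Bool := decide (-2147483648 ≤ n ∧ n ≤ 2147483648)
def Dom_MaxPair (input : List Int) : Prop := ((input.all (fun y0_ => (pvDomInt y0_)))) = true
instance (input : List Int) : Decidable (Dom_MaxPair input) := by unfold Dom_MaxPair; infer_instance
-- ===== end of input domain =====

-- B replaces A's O(n^2) double loop by a single backward pass keeping running suffix max/min
-- and choosing max or min by the sign of the adjacent-pair product (objective: faster).

-- ===== PORT A =====
-- shared helper: Python's 'if best is None or best < new: best = new' update (used verbatim by both sources)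
def noneMax (m : Option Int) (z : Int) : Option Int :=
  match m with
  | none => some z
  | some v => if v < z then some z else some v

def MaxPair (input : List Int) : Option Int :=
  let size : Int := (input.length : Int) - 1
  (PySem.List.pyRange 0 ((input.length : Int) - 2) 1).foldl
    (fun m i =>
      -- while (b < c) with b = i+1, c counting down from size: for c in range(size, i+1, -1)
      (PySem.List.pyRange size (i + 1) (-1)).foldl
        (fun m c =>
          noneMax m (PySem.List.pyGetD input i 0 * PySem.List.pyGetD input (i + 1) 0 *
            PySem.List.pyGetD input c 0)) m)
    none

-- ===== PORT B =====
-- the body of B's single backward loop: update suffix max/min, then the best product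
def bstep (input : List Int) (s : Int × Int × Option Int) (i : Int) : Int × Int × Option Int :=
  let z := PySem.List.pyGetD input (i + 2) 0
  let hi := if z > s.1 then z else s.1
  let lo := if z < s.2.1 then z else s.2.1
  let p := PySem.List.pyGetD input i 0 * PySem.List.pyGetD input (i + 1) 0
  let cand := if p ≥ 0 then p * hi else p * lo
  (hi, lo, noneMax s.2.2 cand)

def MaxPair_alt (input : List Int) : Option Int :=
  let n := input.length
  if n < 3 then none
  else
    let start := PySem.List.pyGetD input ((n : Int) - 1) 0
    let st := (PySem.List.pyRange ((n : Int) - 3) (-1) (-1)).foldl (bstep input) (start, start, none)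
    st.2.2

-- ===== PRECONDITION & SPEC =====
def Spec_MaxPair (input : List Int) (out : Option Int) : Prop := out = MaxPair_alt input
instance (input : List Int) (out : Option Int) : Decidable (Spec_MaxPair input out) := by unfold Spec_MaxPair; infer_instance

-- ===== CLAIM (what is proved, stated in full; the proofs are below) =====
def Claim_equal_MaxPair : Prop := ∀ (input : List Int), Dom_MaxPair input → Spec_MaxPair input (MaxPair input)

-- ===== LEMMAS AND PROOFS =====

-- x j, shorthand for input[j] at a Nat index (indices used by both programs are always in range)
def xg (input : List Int) (j : Nat) : Int := input.getD j 0

-- the candidate values input[i]*input[i+1]*input[c] with s ≤ i and i+2 ≤ c < len input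
def CandGe (input : List Int) (s : Nat) (v : Int) : Prop :=
  ∃ i c : Nat, s ≤ i ∧ i + 2 ≤ c ∧ c < input.length ∧
    v = xg input i * xg input (i + 1) * xg input c

theorem noneMax_some (v z : Int) : noneMax (some v) z = some (max v z) := by
  simp only [noneMax]
  split <;> simp <;> omega

-- characterization of a noneMax-fold: the result is the running maximum
-- absorbing one step of noneMax into the bound
theorem le_of_noneMax (m : Option Int) (a u : Int)
    (h : ∀ w, noneMax m a = some w → w ≤ u) : a ≤ u ∧ (∀ w, m = some w → w ≤ u) := by
  cases m with
  | none => exact ⟨h a rfl, by intro w hw; cases hw⟩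
  | some v =>
    have := h (max v a) (noneMax_some v a)
    exact ⟨le_trans (le_max_right v a) this,
      by intro w hw; injection hw with hw; exact hw ▸ le_trans (le_max_left v a) this⟩

-- characterization of a noneMax-fold: the result is the running maximum
theorem foldl_noneMax_char (l : List Int) (m : Option Int) :
    (l = [] ∧ l.foldl noneMax m = m) ∨
    ∃ u, l.foldl noneMax m = some u ∧ (u ∈ l ∨ m = some u) ∧
      (∀ y ∈ l, y ≤ u) ∧ (∀ w, m = some w → w ≤ u) := by
  induction l generalizing m with
  | nil => exact Or.inl ⟨rfl, rfl⟩
  | cons a t ih =>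
    right
    rcases ih (noneMax m a) with ⟨ht, hr⟩ | ⟨u, hu, hmem, hdom, hw⟩
    · subst ht
      cases m with
      | none =>
        exact ⟨a, by simp [List.foldl, noneMax], Or.inl (by simp), by simp, by simp⟩
      | some v =>
        refine ⟨max v a, by simp [List.foldl, noneMax_some], ?_, ?_, ?_⟩
        · rcases max_choice v a with hc | hc
          · exact Or.inr (by rw [hc])
          · exact Or.inl (by simp [hc])
        · intro y hy; simp at hy; subst hy; exact le_max_right _ _
        · intro w hw; injection hw with hw; subst hw; exact le_max_left _ _
    · have habs := le_of_noneMax m a u hw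
      refine ⟨u, by simpa using hu, ?_, ?_, habs.2⟩
      · rcases hmem with h | h
        · exact Or.inl (List.mem_cons_of_mem _ h)
        · cases m with
          | none =>
            simp only [noneMax] at h
            injection h with h
            exact Or.inl (h ▸ List.mem_cons_self)
          | some v =>
            rw [noneMax_some] at h
            injection h with h
            rcases max_choice v a with hc | hc
            · rw [hc] at h; exact Or.inr (by rw [h])
            · rw [hc] at h; exact Or.inl (h ▸ List.mem_cons_self)
      · intro y hy
        rcases List.mem_cons.mp hy with h | h
        · subst h; exact habs.1
        · exact hdom y h

theorem foldl_noneMax_flatMap {a : Type} (l : List a) (g : a -> List Int) (m : Option Int) :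
    (l.flatMap g).foldl noneMax m = l.foldl (fun acc x => (g x).foldl noneMax acc) m := by
  induction l generalizing m with
  | nil => rfl
  | cons x t ih => simp [List.flatMap_cons, List.foldl_append, ih]

-- the full candidate list A's double loop walks, in A's order
def LA (input : List Int) : List Int :=
  (PySem.List.pyRange 0 ((input.length : Int) - 2) 1).flatMap
    (fun i => (PySem.List.pyRange ((input.length : Int) - 1) (i + 1) (-1)).map
      (fun c => PySem.List.pyGetD input i 0 * PySem.List.pyGetD input (i + 1) 0 *
        PySem.List.pyGetD input c 0))

theorem A_eq (input : List Int) : MaxPair input = (LA input).foldl noneMax none := by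
  simp only [MaxPair, LA, foldl_noneMax_flatMap, List.foldl_map]

theorem mem_LA (input : List Int) (y : Int) : y ∈ LA input ↔ CandGe input 0 y := by
  simp only [LA, List.mem_flatMap, List.mem_map, PySem.List.mem_pyRange_one,
    PySem.List.mem_pyRange_neg_one, CandGe]
  constructor
  · rintro ⟨i, ⟨hi0, hi2⟩, c, ⟨hc1, hc2⟩, hy⟩
    refine ⟨i.toNat, c.toNat, Nat.zero_le _, by omega, by omega, ?_⟩
    rw [← hy]
    have h1 : i = (i.toNat : Int) := by omega
    have h2 : c = (c.toNat : Int) := by omega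
    rw [h1, h2]
    have h3 : ((i.toNat : Int) + 1) = ((i.toNat + 1 : Nat) : Int) := by push_cast; ring
    rw [h3]
    simp only [PySem.List.pyGetD_natCast, xg, Int.toNat_natCast]
  · rintro ⟨i, c, -, hic, hcn, hy⟩
    refine ⟨(i : Int), ⟨by omega, by omega⟩, (c : Int), ⟨by omega, by omega⟩, ?_⟩
    rw [hy]
    have h3 : ((i : Int) + 1) = ((i + 1 : Nat) : Int) := by push_cast; ring
    rw [h3]
    simp only [PySem.List.pyGetD_natCast, xg]

theorem A_none (input : List Int) (h : input.length < 3) : MaxPair input = none := by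
  rw [A_eq]
  have : PySem.List.pyRange 0 ((input.length : Int) - 2) 1 = [] :=
    PySem.List.pyRange_one_eq_nil (by omega)
  simp [LA, this]

theorem A_char (input : List Int) (hn : 3 ≤ input.length) :
    ∃ u, MaxPair input = some u ∧ CandGe input 0 u ∧ ∀ v, CandGe input 0 v → v ≤ u := by
  rw [A_eq]
  rcases foldl_noneMax_char (LA input) none with ⟨hnil, -⟩ | ⟨u, hu, hmem, hdom, -⟩
  · exfalso
    have : xg input 0 * xg input 1 * xg input (input.length - 1) ∈ LA input := by
      rw [mem_LA]
      exact ⟨0, input.length - 1, le_refl _, by omega, by omega, by norm_num⟩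
    rw [hnil] at this
    exact absurd this (List.not_mem_nil)
  · refine ⟨u, hu, ?_, ?_⟩
    · rcases hmem with h | h
      · exact (mem_LA input u).mp h
      · cases h
    · intro v hv
      exact hdom v ((mem_LA input v).mpr hv)

-- B's loop invariants: hi (resp. lo) is an element of input[min s (n-1):] bounding input[s:] above (resp. below)
def HiInv (input : List Int) (s : Nat) (h : Int) : Prop :=
  (∃ c : Nat, min s (input.length - 1) ≤ c ∧ c < input.length ∧ h = xg input c) ∧
  (∀ c : Nat, s ≤ c → c < input.length → xg input c ≤ h)

def LoInv (input : List Int) (s : Nat) (h : Int) : Prop :=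
  (∃ c : Nat, min s (input.length - 1) ≤ c ∧ c < input.length ∧ h = xg input c) ∧
  (∀ c : Nat, s ≤ c → c < input.length → h ≤ xg input c)

-- best is the running maximum over the groups with index ≥ s (none while no group exists)
def BInv (input : List Int) (s : Nat) (b : Option Int) : Prop :=
  (s + 3 ≤ input.length → ∃ u, b = some u ∧ CandGe input s u ∧ ∀ v, CandGe input s v → v ≤ u) ∧
  (input.length < s + 3 → b = none)

theorem B_step (input : List Int) (j : Nat) (hi lo : Int) (best : Option Int)
    (hj : j + 3 ≤ input.length)
    (hhi : HiInv input (j + 3) hi) (hlo : LoInv input (j + 3) lo)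
    (hb : BInv input (j + 1) best) :
    HiInv input (j + 2) (bstep input (hi, lo, best) (j : Int)).1 ∧
    LoInv input (j + 2) (bstep input (hi, lo, best) (j : Int)).2.1 ∧
    BInv input j (bstep input (hi, lo, best) (j : Int)).2.2 := by
  have hcast2 : ((j : Int) + 2) = ((j + 2 : Nat) : Int) := by push_cast; ring
  have hcast1 : ((j : Int) + 1) = ((j + 1 : Nat) : Int) := by push_cast; ring
  simp only [bstep, hcast2, hcast1, PySem.List.pyGetD_natCast]
  set n := input.length with hn
  -- rename getD to xg
  have hx : ∀ k : Nat, input.getD k 0 = xg input k := fun _ => rfl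
  simp only [hx]
  set z := xg input (j + 2) with hz
  set hi' := if z > hi then z else hi with hhi'
  set lo' := if z < lo then z else lo with hlo'
  set p := xg input j * xg input (j + 1) with hp
  set cand := if p ≥ 0 then p * hi' else p * lo' with hcand
  obtain ⟨⟨c0, hc0s, hc0n, hc0e⟩, hidom⟩ := hhi
  obtain ⟨⟨d0, hd0s, hd0n, hd0e⟩, hldom⟩ := hlo
  -- strict witnesses and dominance for the updated extrema
  have hi'mem : ∃ c : Nat, j + 2 ≤ c ∧ c < n ∧ hi' = xg input c := by
    rw [hhi']
    split
    · exact ⟨j + 2, le_refl _, by omega, rfl⟩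
    · exact ⟨c0, by omega, hc0n, hc0e⟩
  have hi'dom : ∀ c : Nat, j + 2 ≤ c → c < n → xg input c ≤ hi' := by
    intro c hc1 hc2
    rcases Nat.eq_or_lt_of_le hc1 with h | h
    · rw [hhi', ← h]; split <;> omega
    · have := hidom c (by omega) hc2
      rw [hhi']; split <;> omega
  have lo'mem : ∃ c : Nat, j + 2 ≤ c ∧ c < n ∧ lo' = xg input c := by
    rw [hlo']
    split
    · exact ⟨j + 2, le_refl _, by omega, rfl⟩
    · exact ⟨d0, by omega, hd0n, hd0e⟩
  have lo'dom : ∀ c : Nat, j + 2 ≤ c → c < n → lo' ≤ xg input c := by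
    intro c hc1 hc2
    rcases Nat.eq_or_lt_of_le hc1 with h | h
    · rw [hlo', ← h]; split <;> omega
    · have := hldom c (by omega) hc2
      rw [hlo']; split <;> omega
  -- cand is the maximum of group j
  have cand_mem : ∃ c : Nat, j + 2 ≤ c ∧ c < n ∧ cand = xg input j * xg input (j + 1) * xg input c := by
    rw [hcand]
    split
    · obtain ⟨c, h1, h2, h3⟩ := hi'mem
      exact ⟨c, h1, h2, by rw [h3, hp]⟩
    · obtain ⟨c, h1, h2, h3⟩ := lo'mem
      exact ⟨c, h1, h2, by rw [h3, hp]⟩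
  have cand_dom : ∀ c : Nat, j + 2 ≤ c → c < n → xg input j * xg input (j + 1) * xg input c ≤ cand := by
    intro c hc1 hc2
    rw [hcand]
    split
    · next hp0 => exact hp ▸ mul_le_mul_of_nonneg_left (hi'dom c hc1 hc2) hp0
    · next hp0 => exact hp ▸ mul_le_mul_of_nonpos_left (lo'dom c hc1 hc2) (by omega)
  refine ⟨⟨?_, ?_⟩, ⟨?_, ?_⟩, ?_, ?_⟩
  · obtain ⟨c, h1, h2, h3⟩ := hi'mem
    exact ⟨c, by omega, h2, h3⟩
  · exact hi'dom
  · obtain ⟨c, h1, h2, h3⟩ := lo'mem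
    exact ⟨c, by omega, h2, h3⟩
  · exact lo'dom
  · -- the running best now covers group j as well
    intro _
    cases hbv : best with
    | none =>
      have hsmall : n < j + 4 := by
        by_contra hge
        obtain ⟨u, hu, -⟩ := hb.1 (by omega)
        rw [hbv] at hu; cases hu
      refine ⟨cand, rfl, ?_, ?_⟩
      · obtain ⟨c, h1, h2, h3⟩ := cand_mem
        exact ⟨j, c, le_refl _, h1, h2, h3⟩
      · rintro v ⟨i, c, his, hic, hcn, hv⟩
        have : i = j := by omega
        subst this
        exact hv ▸ cand_dom c hic hcn
    | some u =>
      have hbig : j + 4 ≤ n := by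
        by_contra hlt
        have := hb.2 (by omega)
        rw [hbv] at this; cases this
      obtain ⟨u', hu', hcu, hdu⟩ := hb.1 hbig
      rw [hbv] at hu'; injection hu' with hu'; subst hu'
      refine ⟨max u cand, noneMax_some u cand, ?_, ?_⟩
      · rcases max_choice u cand with h | h
        · rw [h]
          obtain ⟨i, c, his, hic, hcn, hv⟩ := hcu
          exact ⟨i, c, by omega, hic, hcn, hv⟩
        · rw [h]
          obtain ⟨c, h1, h2, h3⟩ := cand_mem
          exact ⟨j, c, le_refl _, h1, h2, h3⟩
      · rintro v ⟨i, c, his, hic, hcn, hv⟩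
        rcases Nat.eq_or_lt_of_le his with h | h
        · have := cand_dom c (by omega) hcn
          rw [hv, ← h]
          exact le_trans this (le_max_right _ _)
        · have := hdu v ⟨i, c, by omega, hic, hcn, hv⟩
          exact le_trans this (le_max_left _ _)
  · intro h
    omega

theorem B_loop (input : List Int) :
    ∀ (j : Nat) (hi lo : Int) (best : Option Int), j + 3 ≤ input.length →
      HiInv input (j + 3) hi → LoInv input (j + 3) lo → BInv input (j + 1) best →
      BInv input 0
        (((PySem.List.pyRange (j : Int) (-1) (-1)).foldl (bstep input) (hi, lo, best)).2.2) := by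
  intro j
  induction j with
  | zero =>
    intro hi lo best hj hhi hlo hb
    have hcons : PySem.List.pyRange ((0 : Nat) : Int) (-1) (-1) = [((0 : Nat) : Int)] := by decide
    rw [hcons]
    obtain ⟨-, -, h3⟩ := B_step input 0 hi lo best hj hhi hlo hb
    exact h3
  | succ j ih =>
    intro hi lo best hj hhi hlo hb
    have hcons : PySem.List.pyRange ((j + 1 : Nat) : Int) (-1) (-1) =
        ((j + 1 : Nat) : Int) :: PySem.List.pyRange ((j : Nat) : Int) (-1) (-1) := by
      have harg : ((j + 1 : Nat) : Int) - 1 = ((j : Nat) : Int) := by push_cast; ring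
      have := PySem.List.pyRange_neg_one_cons (a := ((j + 1 : Nat) : Int)) (b := (-1)) (by push_cast; omega)
      rw [this, harg]
    rw [hcons, List.foldl_cons]
    obtain ⟨h1, h2, h3⟩ := B_step input (j + 1) hi lo best hj hhi hlo hb
    obtain ⟨st1, st2, st3, hst⟩ : ∃ a b c, bstep input (hi, lo, best) ((j + 1 : Nat) : Int) = (a, b, c) :=
      ⟨_, _, _, rfl⟩
    rw [hst] at h1 h2 h3 ⊢
    exact ih st1 st2 st3 (by omega) h1 h2 h3

theorem B_char (input : List Int) (hn : 3 ≤ input.length) :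
    ∃ u, MaxPair_alt input = some u ∧ CandGe input 0 u ∧ ∀ v, CandGe input 0 v → v ≤ u := by
  have hc3 : ((input.length : Int) - 3) = ((input.length - 3 : Nat) : Int) := by omega
  have hc1 : ((input.length : Int) - 1) = ((input.length - 1 : Nat) : Int) := by omega
  have hB : MaxPair_alt input =
      ((PySem.List.pyRange ((input.length - 3 : Nat) : Int) (-1) (-1)).foldl (bstep input)
        (xg input (input.length - 1), xg input (input.length - 1), none)).2.2 := by
    simp only [MaxPair_alt, if_neg (by omega : ¬ input.length < 3), hc3, hc1,
      PySem.List.pyGetD_natCast]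
    rfl
  rw [hB]
  have hinv := B_loop input (input.length - 3)
    (xg input (input.length - 1)) (xg input (input.length - 1)) none (by omega)
    ⟨⟨input.length - 1, by omega, by omega, rfl⟩, by intro c h1 h2; omega⟩
    ⟨⟨input.length - 1, by omega, by omega, rfl⟩, by intro c h1 h2; omega⟩
    ⟨by intro h; omega, by intro h; rfl⟩
  exact hinv.1 (by omega)

-- ===== VERDICT (by name: the statement is the Claim_ definition above) =====
theorem MaxPair_spec : Claim_equal_MaxPair := by
  intro input _
  unfold Spec_MaxPair
  by_cases h : input.length < 3
  · rw [A_none input h]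
    simp [MaxPair_alt, h]
  · push Not at h
    obtain ⟨u, hAu, hAc, hAd⟩ := A_char input h
    obtain ⟨w, hBw, hBc, hBd⟩ := B_char input h
    rw [hAu, hBw]
    exact congrArg some (le_antisymm (hBd u hAc) (hAd w hBc))
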